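-- pv_equiv track=rewrite | github.com/marth00165/DigitalDefenseIncCC | question2Attempt2.py | apply_port_exclusions
-- ===== SOURCE A (Python) =====
-- def reduce_ports(include_range, exclude_range):
--     # Remove all excluded Ports
--     safe_ports = [port for port in include_range if port not in exclude_range]
--
--     outlist = []
--     cleared_ports = []
--     templist = [safe_ports.pop(0)]
--
--     # Create Ranges of new safe ports
--     while len(safe_ports) > 0:
--         new_port = safe_ports.pop(0)
--         # if the current port range difference is greater than 1 create new range
--         if new_port - templist[-1] > 1:
--             outlist.append(templist)
--             templist = [new_port]
--         else:  # else if difference is not greated than 1 include in range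
--             templist.append(new_port)
--     outlist.append(templist)
--
--     # Get 2 value pairs for ranges
--     for port_list in outlist:
--         cleared_ports.append([port_list[0], port_list[-1]])
--
--     return cleared_ports
--
-- def apply_port_exclusions(include_ports, exclude_ports):
--
--     # If no ports included return empty
--     if len(include_ports) == 0:
--         return []
--
--     include_range_list = []
--     exclude_range_list = []
--
--     # Get every included port's range
--     for port in include_ports:
--         include_min = port[0]
--         include_max = port[1] + 1
--         port_range = range(include_min, include_max)
--         include_range_list.append(port_range)
--
--     # Get every excluded port's range
--     for port in exclude_ports:
--         exclude_min = port[0]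
--         exclude_max = port[1] + 1
--         port_range = range(exclude_min, exclude_max)
--         exclude_range_list.append(port_range)
--
--     # Flatten all available ports into one array
--     include_range = [
--         port for sublist in include_range_list for port in sublist]
--
--     exclude_range = [
--         port for sublist in exclude_range_list for port in sublist]
--
--     # Sort arrays for order
--     include_range.sort()
--     exclude_range.sort()
--
--     # Function Removes all excluded ports and returns possible ports
--     answer = reduce_ports(include_range, exclude_range)
--     return answer
-- ===== SOURCE B (Python) =====
-- def apply_port_exclusions(include_ports, exclude_ports):
--     # Interval-free set arithmetic: one hash-set difference instead of a
--     # per-port scan of the exclusion list, then a single linear pass that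
--     # emits [start, end] pairs directly.
--     if len(include_ports) == 0:
--         return []
--
--     included = set()
--     for port in include_ports:
--         included.update(range(port[0], port[1] + 1))
--
--     excluded = set()
--     for port in exclude_ports:
--         excluded.update(range(port[0], port[1] + 1))
--
--     kept = sorted(included - excluded)
--     if not kept:
--         return []
--
--     result = []
--     start = prev = kept[0]
--     for x in kept[1:]:
--         if x - prev > 1:
--             result.append([start, prev])
--             start = x
--         prev = x
--     result.append([start, prev])
--     return result
-- ===== Notes on version B (the rewrite author's own statement) =====
-- stated objective: faster
-- what changed: B replaces A's per-port linear scan of the flattened exclusion list ('port not in exclude_range') and A's templist-based range regrouping by one hash-set difference (set(included) - set(excluded)) followed by a single linear pass over the sorted kept ports that emits [start, end] pairs directly.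
import Mathlib
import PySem

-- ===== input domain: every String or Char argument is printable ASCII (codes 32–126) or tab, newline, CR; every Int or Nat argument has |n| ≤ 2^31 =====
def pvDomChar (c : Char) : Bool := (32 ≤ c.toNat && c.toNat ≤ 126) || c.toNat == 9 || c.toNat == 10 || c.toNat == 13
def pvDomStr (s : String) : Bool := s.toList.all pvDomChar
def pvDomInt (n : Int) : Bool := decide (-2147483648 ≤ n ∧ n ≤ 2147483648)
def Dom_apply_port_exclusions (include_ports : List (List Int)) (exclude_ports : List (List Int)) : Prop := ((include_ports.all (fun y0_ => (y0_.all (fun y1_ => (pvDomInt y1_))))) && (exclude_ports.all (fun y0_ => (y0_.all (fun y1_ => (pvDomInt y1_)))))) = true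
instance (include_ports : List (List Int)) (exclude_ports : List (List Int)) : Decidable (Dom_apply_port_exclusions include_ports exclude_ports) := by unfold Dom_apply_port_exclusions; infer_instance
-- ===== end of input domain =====

-- B replaces A's per-port scan of the flattened exclusion list by one hash-set
-- difference plus a single linear grouping pass (objective: faster, asymptotic).
-- Where the Python A raises IndexError (a short port pair, or every included
-- port excluded so pop(0) hits an empty list) both Pythons raise except that B
-- naturally returns [] for the all-excluded case; those inputs are outside Pre_.

-- ===== PORT A =====
-- the while-loop of reduce_ports: pops from safe_ports, carries templist/outlist
def pvReduceLoop : List Int → List Int → List (List Int) → List (List Int)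
  | [], templist, outlist => outlist ++ [templist]
  | new_port :: rest, templist, outlist =>
    if new_port - PySem.List.pyGetD templist (-1) 0 > 1 then
      pvReduceLoop rest [new_port] (outlist ++ [templist])
    else
      pvReduceLoop rest (templist ++ [new_port]) outlist

def pvReducePorts (include_range : List Int) (exclude_range : List Int) : List (List Int) :=
  let safe_ports := include_range.filter (fun port => !(exclude_range.contains port))
  match safe_ports with
  | [] => []   -- Python raises IndexError here (pop(0) from empty list); outside Pre_
  | p0 :: rest =>
    (pvReduceLoop rest [p0] []).map
      (fun port_list => [PySem.List.pyGetD port_list 0 0, PySem.List.pyGetD port_list (-1) 0])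

def apply_port_exclusions (include_ports : List (List Int)) (exclude_ports : List (List Int)) : List (List Int) :=
  if include_ports.length = 0 then []
  else
    let include_range_list := include_ports.foldl (fun acc port =>
      acc ++ [PySem.List.pyRange (PySem.List.pyGetD port 0 0) (PySem.List.pyGetD port 1 0 + 1) 1]) []
    let exclude_range_list := exclude_ports.foldl (fun acc port =>
      acc ++ [PySem.List.pyRange (PySem.List.pyGetD port 0 0) (PySem.List.pyGetD port 1 0 + 1) 1]) []
    let include_range := include_range_list.foldl (fun acc sublist => acc ++ sublist) []
    let exclude_range := exclude_range_list.foldl (fun acc sublist => acc ++ sublist) []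
    let include_sorted := PySem.List.sorted include_range (fun x => x) false
    let exclude_sorted := PySem.List.sorted exclude_range (fun x => x) false
    pvReducePorts include_sorted exclude_sorted

-- ===== PORT B =====
-- the single grouping pass over the kept ports, carrying (result, start, prev)
def pvGroupLoop : List Int → List (List Int) → Int → Int → List (List Int)
  | [], result, start, prev => result ++ [[start, prev]]
  | x :: xs, result, start, prev =>
    if x - prev > 1 then pvGroupLoop xs (result ++ [[start, prev]]) x x
    else pvGroupLoop xs result start x

def apply_port_exclusions_alt (include_ports : List (List Int)) (exclude_ports : List (List Int)) : List (List Int) :=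
  if include_ports.length = 0 then []
  else
    let included := include_ports.foldl (fun s port =>
      PySem.Set.update s (PySem.List.pyRange (PySem.List.pyGetD port 0 0) (PySem.List.pyGetD port 1 0 + 1) 1)) PySem.Set.empty
    let excluded := exclude_ports.foldl (fun s port =>
      PySem.Set.update s (PySem.List.pyRange (PySem.List.pyGetD port 0 0) (PySem.List.pyGetD port 1 0 + 1) 1)) PySem.Set.empty
    let kept := PySem.List.sorted (PySem.Set.diff included excluded) (fun x => x) false
    match kept with
    | [] => []
    | k0 :: rest => pvGroupLoop rest [] k0 k0

-- ===== PRECONDITION & SPEC =====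
-- Pre_ admits exactly the inputs on which the Python A returns: either no
-- included ports, or every port pair has length ≥ 2 and at least one included
-- port survives the exclusion (otherwise A raises IndexError).
def Pre_apply_port_exclusions (include_ports : List (List Int)) (exclude_ports : List (List Int)) : Prop :=
  include_ports = [] ∨
  ((∀ p ∈ include_ports, 2 ≤ p.length) ∧ (∀ p ∈ exclude_ports, 2 ≤ p.length) ∧
   ∃ p ∈ include_ports,
     ∃ x ∈ (PySem.List.pyGetD p 0 0 :: exclude_ports.map (fun e => PySem.List.pyGetD e 1 0 + 1)),
       PySem.List.pyGetD p 0 0 ≤ x ∧ x ≤ PySem.List.pyGetD p 1 0 ∧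
       ∀ e ∈ exclude_ports, ¬ (PySem.List.pyGetD e 0 0 ≤ x ∧ x ≤ PySem.List.pyGetD e 1 0))
instance (include_ports : List (List Int)) (exclude_ports : List (List Int)) : Decidable (Pre_apply_port_exclusions include_ports exclude_ports) := by unfold Pre_apply_port_exclusions; infer_instance

def pvWitness_apply_port_exclusions : List (List Int) × List (List Int) := ([[1, 3]], [[2, 2]])

def Spec_apply_port_exclusions (include_ports : List (List Int)) (exclude_ports : List (List Int)) (out : List (List Int)) : Prop := out = apply_port_exclusions_alt include_ports exclude_ports
instance (include_ports : List (List Int)) (exclude_ports : List (List Int)) (out : List (List Int)) : Decidable (Spec_apply_port_exclusions include_ports exclude_ports out) := by unfold Spec_apply_port_exclusions; infer_instance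

-- ===== CLAIM (what is proved, stated in full; the proofs are below) =====
def Claim_equal_apply_port_exclusions : Prop := ∀ (include_ports : List (List Int)) (exclude_ports : List (List Int)), Dom_apply_port_exclusions include_ports exclude_ports → Pre_apply_port_exclusions include_ports exclude_ports → Spec_apply_port_exclusions include_ports exclude_ports (apply_port_exclusions include_ports exclude_ports)
-- ===== LEMMAS AND PROOFS =====

-- membership in the set built by the B-side range/update loop
theorem pv_mem_foldl_update (ps : List (List Int)) (s : PySem.Set Int) (y : Int) :
    y ∈ ps.foldl (fun s port =>
        PySem.Set.update s (PySem.List.pyRange (PySem.List.pyGetD port 0 0) (PySem.List.pyGetD port 1 0 + 1) 1)) s ↔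
      y ∈ s ∨ ∃ p ∈ ps, PySem.List.pyGetD p 0 0 ≤ y ∧ y < PySem.List.pyGetD p 1 0 + 1 := by
  induction ps generalizing s with
  | nil => simp
  | cons p ps ih =>
    simp [List.foldl_cons, ih, PySem.Set.mem_update, PySem.List.mem_pyRange_one]
    tauto

theorem pv_nodup_foldl_update (ps : List (List Int)) (s : PySem.Set Int) (h : s.Nodup) :
    (ps.foldl (fun s port =>
        PySem.Set.update s (PySem.List.pyRange (PySem.List.pyGetD port 0 0) (PySem.List.pyGetD port 1 0 + 1) 1)) s).Nodup := by
  induction ps generalizing s with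
  | nil => exact h
  | cons p ps ih => exact ih _ (PySem.Set.nodup_update _ _ h)

-- the flattened range list built by A's two foldl loops
theorem pv_flatten_eq (ps : List (List Int)) :
    ((ps.foldl (fun acc port =>
        acc ++ [PySem.List.pyRange (PySem.List.pyGetD port 0 0) (PySem.List.pyGetD port 1 0 + 1) 1]) []).foldl
      (fun acc sublist => acc ++ sublist) [])
    = ps.flatMap (fun port => PySem.List.pyRange (PySem.List.pyGetD port 0 0) (PySem.List.pyGetD port 1 0 + 1) 1) := by
  rw [PySem.List.foldl_append_eq_flatMap, PySem.List.foldl_append_eq_flatMap]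
  simp only [List.nil_append]
  induction ps with
  | nil => simp
  | cons p ps ih => simp [List.flatMap_cons, ih]

-- the grouping pass gives the same pairs on a (≤)-sorted list with duplicates
-- and on its strictly sorted deduplication
theorem pv_groupLoop_congr : ∀ (l1 l2 : List Int) (res : List (List Int)) (start prev : Int),
    l1.Pairwise (· ≤ ·) → l2.Pairwise (· < ·) →
    (∀ y ∈ l1, prev ≤ y) → (∀ y, y ∈ l2 ↔ (y ∈ l1 ∧ y ≠ prev)) →
    pvGroupLoop l1 res start prev = pvGroupLoop l2 res start prev := by
  intro l1
  induction l1 with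
  | nil =>
    intro l2 res start prev _ _ _ hmem
    have : l2 = [] := by
      cases l2 with
      | nil => rfl
      | cons a t => exact absurd ((hmem a).1 (List.mem_cons_self)).1 (by simp)
    simp [this]
  | cons x t1 ih =>
    intro l2 res start prev hp1 hp2 hlow hmem
    rcases (hlow x (List.mem_cons_self)).lt_or_eq with hlt | heq
    · -- prev < x : l2 starts with x as well
      have hxl2 : x ∈ l2 := (hmem x).2 ⟨List.mem_cons_self, by omega⟩
      obtain ⟨t2, rfl⟩ : ∃ t2, l2 = x :: t2 := by
        cases l2 with
        | nil => simp at hxl2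
        | cons k t2 =>
          have hkmin : ∀ y ∈ t2, k < y := fun y hy => List.rel_of_pairwise_cons hp2 hy
          have hk1 : k ∈ x :: t1 := ((hmem k).1 (List.mem_cons_self)).1
          have hxk : x ≤ k := by
            rcases List.mem_cons.1 hk1 with h' | h'
            · omega
            · exact List.rel_of_pairwise_cons hp1 h'
          have hkx : k = x := by
            rcases List.mem_cons.1 hxl2 with h | h
            · omega
            · have := hkmin x h
              omega
          exact ⟨t2, by rw [hkx]⟩
      have hkmin : ∀ y ∈ t2, x < y := fun y hy => List.rel_of_pairwise_cons hp2 hy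
      have step : ∀ res' start',
          pvGroupLoop t1 res' start' x = pvGroupLoop t2 res' start' x := by
        intro res' start'
        refine ih t2 res' start' x hp1.of_cons hp2.of_cons
          (fun y hy => List.rel_of_pairwise_cons hp1 hy) ?_
        intro y
        constructor
        · intro hy
          have hyl2 : y ∈ x :: t2 := List.mem_cons_of_mem _ hy
          have := (hmem y).1 hyl2
          have hxy := hkmin y hy
          rcases List.mem_cons.1 this.1 with h' | h'
          · omega
          · exact ⟨h', by omega⟩
        · rintro ⟨hy, hne⟩
          have hyprev : y ≠ prev := by
            have := List.rel_of_pairwise_cons hp1 hy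
            omega
          have : y ∈ x :: t2 := (hmem y).2 ⟨List.mem_cons_of_mem _ hy, hyprev⟩
          rcases List.mem_cons.1 this with h' | h'
          · exact absurd h' hne
          · exact h'
      simp only [pvGroupLoop]
      split_ifs with hgt
      · exact step _ _
      · exact step _ _
    · -- x = prev : a duplicate step, the state does not change
      have hx : x = prev := heq.symm
      subst hx
      have hcond : ¬ (x - x > 1) := by omega
      simp only [pvGroupLoop, if_neg hcond]
      refine ih l2 res start x hp1.of_cons hp2
        (fun y hy => List.rel_of_pairwise_cons hp1 hy) ?_
      intro y
      rw [hmem y]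
      constructor
      · rintro ⟨hy, hne⟩
        rcases List.mem_cons.1 hy with h' | h'
        · exact absurd h' hne
        · exact ⟨h', hne⟩
      · rintro ⟨hy, hne⟩
        exact ⟨List.mem_cons_of_mem _ hy, hne⟩

theorem pv_pyGetD_zero_append (t : List Int) (x : Int) (h : t ≠ []) :
    PySem.List.pyGetD (t ++ [x]) 0 0 = PySem.List.pyGetD t 0 0 := by
  cases t with
  | nil => exact absurd rfl h
  | cons a ts => simp [PySem.List.pyGetD_zero_cons]

-- A's while-loop + final pairing equals B's one-pass grouping on the same list
theorem pv_reduceLoop_eq : ∀ (l templist : List Int) (outlist : List (List Int)), templist ≠ [] →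
    (pvReduceLoop l templist outlist).map
        (fun pl => [PySem.List.pyGetD pl 0 0, PySem.List.pyGetD pl (-1) 0])
      = pvGroupLoop l
          (outlist.map (fun pl => [PySem.List.pyGetD pl 0 0, PySem.List.pyGetD pl (-1) 0]))
          (PySem.List.pyGetD templist 0 0) (PySem.List.pyGetD templist (-1) 0) := by
  intro l
  induction l with
  | nil =>
    intro templist outlist h
    simp [pvReduceLoop, pvGroupLoop]
  | cons x xs ih =>
    intro templist outlist h
    simp only [pvReduceLoop, pvGroupLoop]
    split_ifs with hgt
    · rw [ih [x] (outlist ++ [templist]) (by simp)]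
      have h1 : PySem.List.pyGetD [x] (-1) 0 = x := by
        show PySem.List.pyGetD ([] ++ [x]) (-1) 0 = x
        rw [PySem.List.pyGetD_neg_one_append_singleton]
      simp [PySem.List.pyGetD_zero_cons, h1]
    · rw [ih (templist ++ [x]) outlist (by simp)]
      rw [pv_pyGetD_zero_append _ _ h, PySem.List.pyGetD_neg_one_append_singleton]


theorem pv_pyGetD_neg_one_singleton (x : Int) : PySem.List.pyGetD [x] (-1) 0 = x := by
  show PySem.List.pyGetD ([] ++ [x]) (-1) 0 = x
  rw [PySem.List.pyGetD_neg_one_append_singleton]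

theorem pv_lt_of_le_nodup {l : List Int} (h1 : l.Pairwise (· ≤ ·)) (h2 : l.Nodup) :
    l.Pairwise (· < ·) :=
  (h1.and h2).imp (fun h => lt_of_le_of_ne h.1 h.2)

theorem pv_safe_mem (inc exc : List (List Int)) (y : Int) :
    y ∈ List.filter
        (fun port => !(PySem.List.sorted
            (List.flatMap (fun port => PySem.List.pyRange (PySem.List.pyGetD port 0 0) (PySem.List.pyGetD port 1 0 + 1) 1) exc)
            (fun x => x) false).contains port)
        (PySem.List.sorted
          (List.flatMap (fun port => PySem.List.pyRange (PySem.List.pyGetD port 0 0) (PySem.List.pyGetD port 1 0 + 1) 1) inc)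
          (fun x => x) false)
      ↔ y ∈ PySem.List.sorted
          ((List.foldl (fun s port => PySem.Set.update s (PySem.List.pyRange (PySem.List.pyGetD port 0 0) (PySem.List.pyGetD port 1 0 + 1) 1)) PySem.Set.empty inc).diff
            (List.foldl (fun s port => PySem.Set.update s (PySem.List.pyRange (PySem.List.pyGetD port 0 0) (PySem.List.pyGetD port 1 0 + 1) 1)) PySem.Set.empty exc))
          (fun x => x) false := by
  simp [List.mem_filter, PySem.List.mem_sorted, PySem.Set.mem_diff, pv_mem_foldl_update,
    List.mem_flatMap, PySem.List.mem_pyRange_one, PySem.Set.empty]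

theorem pv_main (include_ports exclude_ports : List (List Int)) :
    apply_port_exclusions include_ports exclude_ports
      = apply_port_exclusions_alt include_ports exclude_ports := by
  unfold apply_port_exclusions apply_port_exclusions_alt
  by_cases hlen : include_ports.length = 0
  · simp [hlen]
  · simp only [if_neg hlen]
    rw [pv_flatten_eq, pv_flatten_eq]
    unfold pvReducePorts
    have hmem0 := pv_safe_mem include_ports exclude_ports
    have hp10 : (List.filter
        (fun port => !(PySem.List.sorted
            (List.flatMap (fun port => PySem.List.pyRange (PySem.List.pyGetD port 0 0) (PySem.List.pyGetD port 1 0 + 1) 1) exclude_ports)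
            (fun x => x) false).contains port)
        (PySem.List.sorted
          (List.flatMap (fun port => PySem.List.pyRange (PySem.List.pyGetD port 0 0) (PySem.List.pyGetD port 1 0 + 1) 1) include_ports)
          (fun x => x) false)).Pairwise (· ≤ ·) := by
      exact List.Pairwise.filter _ (PySem.List.sorted_pairwise _ _)
    have hnd : ((List.foldl (fun s port => PySem.Set.update s (PySem.List.pyRange (PySem.List.pyGetD port 0 0) (PySem.List.pyGetD port 1 0 + 1) 1)) PySem.Set.empty include_ports).diff
            (List.foldl (fun s port => PySem.Set.update s (PySem.List.pyRange (PySem.List.pyGetD port 0 0) (PySem.List.pyGetD port 1 0 + 1) 1)) PySem.Set.empty exclude_ports)).Nodup := by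
      exact PySem.Set.nodup_diff _ _ (pv_nodup_foldl_update _ _ List.nodup_nil)
    have hp20 : (PySem.List.sorted
          ((List.foldl (fun s port => PySem.Set.update s (PySem.List.pyRange (PySem.List.pyGetD port 0 0) (PySem.List.pyGetD port 1 0 + 1) 1)) PySem.Set.empty include_ports).diff
            (List.foldl (fun s port => PySem.Set.update s (PySem.List.pyRange (PySem.List.pyGetD port 0 0) (PySem.List.pyGetD port 1 0 + 1) 1)) PySem.Set.empty exclude_ports))
          (fun x => x) false).Pairwise (· < ·) := by
      refine pv_lt_of_le_nodup ?_ (((PySem.List.sorted_perm _ _ _).nodup_iff).2 hnd)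
      exact PySem.List.sorted_pairwise _ _
    rcases hs : (List.filter
        (fun port => !(PySem.List.sorted
            (List.flatMap (fun port => PySem.List.pyRange (PySem.List.pyGetD port 0 0) (PySem.List.pyGetD port 1 0 + 1) 1) exclude_ports)
            (fun x => x) false).contains port)
        (PySem.List.sorted
          (List.flatMap (fun port => PySem.List.pyRange (PySem.List.pyGetD port 0 0) (PySem.List.pyGetD port 1 0 + 1) 1) include_ports)
          (fun x => x) false)) with _ | ⟨s0, r1⟩ <;>
      rcases hk : (PySem.List.sorted
          ((List.foldl (fun s port => PySem.Set.update s (PySem.List.pyRange (PySem.List.pyGetD port 0 0) (PySem.List.pyGetD port 1 0 + 1) 1)) PySem.Set.empty include_ports).diff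
            (List.foldl (fun s port => PySem.Set.update s (PySem.List.pyRange (PySem.List.pyGetD port 0 0) (PySem.List.pyGetD port 1 0 + 1) 1)) PySem.Set.empty exclude_ports))
          (fun x => x) false) with _ | ⟨k0, r2⟩
    · rfl
    · rw [hs] at hmem0
      rw [hk] at hmem0
      exact absurd ((hmem0 k0).2 (List.mem_cons_self)) (by simp)
    · rw [hs] at hmem0
      rw [hk] at hmem0
      exact absurd ((hmem0 s0).1 (List.mem_cons_self)) (by simp)
    · -- both nonempty
      rw [hs] at hmem0 hp10
      rw [hk] at hmem0 hp20
      have hks : k0 = s0 := by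
        have h1 : s0 ∈ k0 :: r2 := (hmem0 s0).1 List.mem_cons_self
        have h2 : k0 ∈ s0 :: r1 := (hmem0 k0).2 List.mem_cons_self
        have hle1 : s0 ≤ k0 := by
          rcases List.mem_cons.1 h2 with h | h
          · omega
          · exact List.rel_of_pairwise_cons hp10 h
        have hle2 : k0 ≤ s0 := by
          rcases List.mem_cons.1 h1 with h | h
          · omega
          · exact le_of_lt (List.rel_of_pairwise_cons hp20 h)
        omega
      subst hks
      show (pvReduceLoop r1 [k0] []).map
          (fun port_list => [PySem.List.pyGetD port_list 0 0, PySem.List.pyGetD port_list (-1) 0])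
        = pvGroupLoop r2 [] k0 k0
      rw [pv_reduceLoop_eq r1 [k0] [] (by simp)]
      simp only [List.map_nil, PySem.List.pyGetD_zero_cons, pv_pyGetD_neg_one_singleton]
      refine pv_groupLoop_congr r1 r2 [] k0 k0 hp10.of_cons hp20.of_cons
        (fun y hy => List.rel_of_pairwise_cons hp10 hy) ?_
      intro y
      constructor
      · intro hy
        have hklt := List.rel_of_pairwise_cons hp20 hy
        have := (hmem0 y).2 (List.mem_cons_of_mem _ hy)
        rcases List.mem_cons.1 this with h | h
        · omega
        · exact ⟨h, by omega⟩
      · rintro ⟨hy, hne⟩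
        have : y ∈ k0 :: r2 := (hmem0 y).1 (List.mem_cons_of_mem _ hy)
        rcases List.mem_cons.1 this with h | h
        · exact absurd h hne
        · exact h

-- ===== VERDICT (by name: the statement is the Claim_ definition above) =====
theorem apply_port_exclusions_spec : Claim_equal_apply_port_exclusions := by
  intro inc exc _ _
  unfold Spec_apply_port_exclusions
  exact pv_main inc exc
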